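-- pv_equiv track=rewrite | github.com/justNotherbot/ege-trainer | main_helpers.py | check_task_string
-- ===== SOURCE A (Python) =====
-- def check_task_string(t_s):
--     s_words = t_s.split()
--     total = 0
--     for i in s_words:
--         if len(i) > 1 and i[0].isalpha() and i[0].isupper() and i[1:].isnumeric():
--             total += int(i[1:])
--         else:
--             return 1, 0
--     return 0, total
-- ===== SOURCE B (Python) =====
-- def check_task_string(t_s):
--     # Single left-to-right character scan (finite-state machine): no split(),
--     # no slicing, no per-word re-validation.
--     # state 0 = between tokens, 1 = just saw the leading letter, 2 = reading digits
--     total = 0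
--     state = 0
--     digits = ''
--     for c in t_s:
--         if state == 0:
--             if c.isspace():
--                 continue
--             if c.isalpha() and c.isupper():
--                 state = 1
--                 digits = ''
--             else:
--                 return 1, 0
--         elif state == 1:
--             if c.isdigit():
--                 digits = c
--                 state = 2
--             else:
--                 return 1, 0
--         else:
--             if c.isdigit():
--                 digits += c
--             elif c.isspace():
--                 total += int(digits)
--                 state = 0
--             else:
--                 return 1, 0
--     if state == 1:
--         return 1, 0
--     if state == 2:
--         total += int(digits)
--     return 0, total
-- ===== Notes on version B (the rewrite author's own statement) =====
-- stated objective: alternative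
-- what changed: Replaces A's split-into-words loop (with len/index/slice checks and int() per word) by a single left-to-right character scan with a 3-state finite-state machine that never materialises the word list or slices.
import Mathlib
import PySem

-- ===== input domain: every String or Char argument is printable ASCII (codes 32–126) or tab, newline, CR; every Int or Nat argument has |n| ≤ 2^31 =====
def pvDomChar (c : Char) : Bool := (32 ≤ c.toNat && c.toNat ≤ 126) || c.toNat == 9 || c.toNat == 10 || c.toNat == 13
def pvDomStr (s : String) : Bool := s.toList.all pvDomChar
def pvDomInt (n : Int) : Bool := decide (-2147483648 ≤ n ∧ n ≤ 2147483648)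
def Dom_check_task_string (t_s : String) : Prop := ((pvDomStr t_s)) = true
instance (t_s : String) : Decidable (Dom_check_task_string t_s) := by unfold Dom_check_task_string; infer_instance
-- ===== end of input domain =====

-- B replaces A's split-into-words validate-and-sum loop by a single character scan
-- with a 3-state finite-state machine (objective: alternative, same cost).


-- ===== PORT A =====
-- len(i) > 1 and i[0].isalpha() and i[0].isupper() and i[1:].isnumeric()
-- (on the printable-ASCII domain str.isnumeric coincides with strIsdigit)
def pvA_ok (w : String) : Bool :=
  decide (1 < PySem.Str.len w)
    && ((PySem.Str.pyGet? w 0).elim false (fun c => PySem.Chars.isalpha c && PySem.Chars.isupper c))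
    && PySem.Str.strIsdigit (PySem.Str.slice w (some 1) none)

-- int(i[1:]); under the guard pvA_ok the suffix is nonempty digits, so ofStr? is some
def pvA_num (w : String) : Int := (PySem.Int.ofStr? (PySem.Str.slice w (some 1) none)).getD 0

-- the for-loop over s_words with its early 'return 1, 0'
def pvA_loop : List String → Int → Int × Int
  | [], total => (0, total)
  | w :: ws, total => if pvA_ok w then pvA_loop ws (total + pvA_num w) else (1, 0)

def check_task_string (t_s : String) : Int × Int :=
  pvA_loop (PySem.Str.split₀ t_s) 0

-- ===== PORT B =====
-- the character scan: state 0 = between tokens, 1 = just saw the leading letter, 2 = reading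
-- digits; 'digits' is the collected suffix, int(digits) is ofChars? (always some in state 2)
def pvB_loop : List Char → Nat → List Char → Int → Int × Int
  | [], state, digits, total =>
      if state == 1 then (1, 0)
      else if state == 2 then (0, total + (PySem.Int.ofChars? digits).getD 0)
      else (0, total)
  | c :: rest, state, digits, total =>
      if state == 0 then
        if PySem.Chars.isspace c then pvB_loop rest 0 digits total
        else if PySem.Chars.isalpha c && PySem.Chars.isupper c then pvB_loop rest 1 [] total
        else (1, 0)
      else if state == 1 then
        if PySem.Chars.isdigit c then pvB_loop rest 2 [c] total
        else (1, 0)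
      else
        if PySem.Chars.isdigit c then pvB_loop rest 2 (digits ++ [c]) total
        else if PySem.Chars.isspace c then pvB_loop rest 0 digits (total + (PySem.Int.ofChars? digits).getD 0)
        else (1, 0)

def check_task_string_alt (t_s : String) : Int × Int :=
  pvB_loop t_s.toList 0 [] 0

-- ===== PRECONDITION & SPEC =====
def Spec_check_task_string (t_s : String) (out : Int × Int) : Prop := out = check_task_string_alt t_s
instance (t_s : String) (out : Int × Int) : Decidable (Spec_check_task_string t_s out) := by unfold Spec_check_task_string; infer_instance

-- ===== CLAIM (what is proved, stated in full; the proofs are below) =====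
def Claim_equal_check_task_string : Prop := ∀ (t_s : String), Dom_check_task_string t_s → Spec_check_task_string t_s (check_task_string t_s)

-- ===== LEMMAS AND PROOFS =====

def pvOkC (w : List Char) : Bool :=
  decide (1 < (w.length : Int))
    && ((PySem.List.pyGet? w 0).elim false (fun c => PySem.Chars.isalpha c && PySem.Chars.isupper c))
    && PySem.Chars.strIsdigit w.tail
def pvValC (w : List Char) : Int := (PySem.Int.ofChars? w.tail).getD 0
def pvGoA : List (List Char) → Int → Int × Int
  | [], total => (0, total)
  | w :: ws, total => if pvOkC w then pvGoA ws (total + pvValC w) else (1, 0)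
theorem pvOkC_cons (c : Char) (l : List Char) :
    pvOkC (c :: l) = (!l.isEmpty && PySem.Chars.isupper c && l.all PySem.Chars.isdigit) := by
  simp [pvOkC, PySem.List.pyGet?, PySem.List.pyIdx?, PySem.Chars.strIsdigit, PySem.Chars.isalpha]
  cases l <;> cases h : PySem.Chars.isupper c <;> cases hl : PySem.Chars.islower c <;> simp_all
theorem pvGo_acc (cs : List Char) (cur : List Char) (acc : List (List Char)) :
    PySem.Chars.split₀.go cs cur acc = acc.reverse ++ PySem.Chars.split₀.go cs cur [] := by
  induction cs generalizing cur acc with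
  | nil => simp [PySem.Chars.split₀.go]; split_ifs <;> simp
  | cons c rest ih =>
    simp only [PySem.Chars.split₀.go]
    split_ifs with h1 h2
    · exact ih _ _
    · rw [ih [] (cur.reverse :: acc), ih [] [cur.reverse]]; simp
    · exact ih _ _

theorem pvNotSpace_of_digit (c : Char) (h : PySem.Chars.isdigit c = true) :
    PySem.Chars.isspace c = false := by
  simp [PySem.Chars.isdigit] at h
  have h1 : 48 ≤ c.toNat := h.1
  have h2 : c.toNat ≤ 57 := h.2
  simp [PySem.Chars.isspace]
  omega

theorem pvUpper_of_andTrue (c : Char) (h : (PySem.Chars.isalpha c && PySem.Chars.isupper c) = true) :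
    PySem.Chars.isupper c = true := (Bool.and_eq_true _ _ |>.mp h).2

theorem pvNotUpper_of_andFalse (c : Char) (h : (PySem.Chars.isalpha c && PySem.Chars.isupper c) = false) :
    PySem.Chars.isupper c = false := by
  cases hu : PySem.Chars.isupper c
  · rfl
  · simp [PySem.Chars.isalpha, hu] at h

theorem pvDoomed (cs cur : List Char) (total : Int)
    (hne : cur ≠ []) (hforall : ∀ t, pvOkC (cur.reverse ++ t) = false) :
    pvGoA (PySem.Chars.split₀.go cs cur []) total = (1, 0) := by
  induction cs generalizing cur total with
  | nil =>
    have h0 := hforall []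
    simp only [List.append_nil] at h0
    simp [PySem.Chars.split₀.go, List.isEmpty_iff, hne, pvGoA, h0]
  | cons c rest ih =>
    simp only [PySem.Chars.split₀.go]
    split_ifs with h1 h2
    · exact absurd (List.isEmpty_iff.mp h2) hne
    · -- space, cur nonempty
      rw [pvGo_acc]
      have h0 := hforall []
      simp only [List.append_nil] at h0
      simp [pvGoA, h0]
    · exact ih (c :: cur) total (by simp)
        (fun t => by simpa using hforall (c :: t))

def pvRel : List Char → Nat → List Char → Prop
  | cur, 0, _ => cur = []
  | cur, 1, ds => ds = [] ∧ ∃ c, PySem.Chars.isupper c = true ∧ cur = [c]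
  | cur, 2, ds => ds ≠ [] ∧ ds.all PySem.Chars.isdigit = true ∧
      ∃ c, PySem.Chars.isupper c = true ∧ cur = ds.reverse ++ [c]
  | _, _ + 3, _ => False

theorem pvMain (cs : List Char) (cur : List Char) (st : Nat) (ds : List Char) (total : Int)
    (hrel : pvRel cur st ds) :
    pvGoA (PySem.Chars.split₀.go cs cur []) total = pvB_loop cs st ds total := by
  induction cs generalizing cur st ds total with
  | nil =>
    match st, hrel with
    | 0, hc => subst hc; simp [PySem.Chars.split₀.go, pvGoA, pvB_loop]
    | 1, ⟨hd, c, hup, hc⟩ =>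
      subst hc; subst hd
      simp [PySem.Chars.split₀.go, pvGoA, pvB_loop, pvOkC_cons]
    | 2, ⟨hdne, hdall, c, hup, hc⟩ =>
      subst hc
      simp [PySem.Chars.split₀.go, pvGoA, pvB_loop, pvOkC_cons, hdne, hdall, hup, pvValC]
  | cons c rest ih =>
    match st, hrel with
    | 0, hc =>
      subst hc
      by_cases hsp : PySem.Chars.isspace c = true
      · simp only [PySem.Chars.split₀.go, pvB_loop, hsp]
        simp only [if_true, List.isEmpty_nil, show ((0:Nat) == 0) = true from rfl]
        exact ih [] 0 ds total rfl
      · by_cases hau : (PySem.Chars.isalpha c && PySem.Chars.isupper c) = true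
        · simp only [PySem.Chars.split₀.go, pvB_loop, hsp, hau]
          simp only [Bool.false_eq_true, if_false, if_true, show ((0:Nat) == 0) = true from rfl]
          exact ih [c] 1 [] total ⟨rfl, c, pvUpper_of_andTrue c hau, rfl⟩
        · simp only [Bool.not_eq_true] at hau
          have hu := pvNotUpper_of_andFalse c hau
          simp only [PySem.Chars.split₀.go, pvB_loop, hsp, hau]
          simp only [Bool.false_eq_true, if_false, if_true, show ((0:Nat) == 0) = true from rfl]
          exact pvDoomed rest [c] total (by simp) (fun t => by simp [pvOkC_cons, hu])
    | 1, ⟨hd, c0, hup, hc⟩ =>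
      subst hc; subst hd
      by_cases hdg : PySem.Chars.isdigit c = true
      · have hsp := pvNotSpace_of_digit c hdg
        simp only [PySem.Chars.split₀.go, pvB_loop, hsp, hdg]
        simp only [Bool.false_eq_true, if_false, if_true,
          show ((1:Nat) == 0) = false from rfl, show ((1:Nat) == 1) = true from rfl]
        exact ih (c :: [c0]) 2 [c] total ⟨by simp, by simp [hdg], c0, hup, rfl⟩
      · simp only [Bool.not_eq_true] at hdg
        by_cases hsp : PySem.Chars.isspace c = true
        · simp only [PySem.Chars.split₀.go, pvB_loop, hsp, hdg]
          simp only [Bool.false_eq_true, if_false, if_true, List.isEmpty_cons, List.reverse_cons,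
            List.reverse_nil, List.nil_append,
            show ((1:Nat) == 0) = false from rfl, show ((1:Nat) == 1) = true from rfl]
          rw [pvGo_acc rest [] [[c0]]]
          simp [pvGoA, pvOkC_cons]
        · simp only [PySem.Chars.split₀.go, pvB_loop, hsp, hdg]
          simp only [Bool.false_eq_true, if_false,
            show ((1:Nat) == 0) = false from rfl, show ((1:Nat) == 1) = true from rfl]
          exact pvDoomed rest (c :: [c0]) total (by simp)
            (fun t => by simp [pvOkC_cons, hdg])
    | 2, ⟨hdne, hdall, c0, hup, hc⟩ =>
      subst hc
      by_cases hdg : PySem.Chars.isdigit c = true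
      · have hsp := pvNotSpace_of_digit c hdg
        simp only [PySem.Chars.split₀.go, pvB_loop, hsp, hdg]
        simp only [Bool.false_eq_true, if_false, if_true,
          show ((2:Nat) == 0) = false from rfl, show ((2:Nat) == 1) = false from rfl]
        have hsw : c :: (ds.reverse ++ [c0]) = (ds ++ [c]).reverse ++ [c0] := by simp
        rw [hsw]
        exact ih _ 2 (ds ++ [c]) total ⟨by simp, by simp [hdall, hdg], c0, hup, rfl⟩
      · simp only [Bool.not_eq_true] at hdg
        by_cases hsp : PySem.Chars.isspace c = true
        · simp only [PySem.Chars.split₀.go, pvB_loop, hsp, hdg]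
          simp only [Bool.false_eq_true, if_false, if_true,
            show ((2:Nat) == 0) = false from rfl, show ((2:Nat) == 1) = false from rfl,
            if_neg (by simp : ¬ ((ds.reverse ++ [c0]).isEmpty = true))]
          rw [pvGo_acc rest [] [(ds.reverse ++ [c0]).reverse]]
          simp only [List.reverse_append, List.reverse_reverse, List.reverse_cons,
            List.reverse_nil, List.nil_append, List.singleton_append]
          simp only [pvGoA, if_pos (by simp [pvOkC_cons, hdne, hdall, hup] :
            pvOkC (c0 :: ds) = true)]
          have hval : pvValC (c0 :: ds) = (PySem.Int.ofChars? ds).getD 0 := rfl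
          rw [hval]
          exact ih [] 0 ds (total + (PySem.Int.ofChars? ds).getD 0) rfl
        · simp only [PySem.Chars.split₀.go, pvB_loop, hsp, hdg]
          simp only [Bool.false_eq_true, if_false,
            show ((2:Nat) == 0) = false from rfl, show ((2:Nat) == 1) = false from rfl]
          exact pvDoomed rest (c :: (ds.reverse ++ [c0])) total (by simp)
            (fun t => by
              have hsw : (c :: (ds.reverse ++ [c0])).reverse ++ t = c0 :: (ds ++ c :: t) := by simp
              rw [hsw]
              simp [pvOkC_cons, hdg])

-- A's per-word test and value, moved to the List Char level
theorem pvA_ok_eq (w : String) : pvA_ok w = pvOkC w.toList := by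
  simp [pvA_ok, pvOkC, pysem, PySem.List.slice_from_one]

theorem pvA_num_eq (w : String) : pvA_num w = pvValC w.toList := by
  simp [pvA_num, pvValC, pysem, PySem.List.slice_from_one, PySem.Int.ofStr?]

theorem pvA_loop_eq (ws : List String) (total : Int) :
    pvA_loop ws total = pvGoA (ws.map String.toList) total := by
  induction ws generalizing total with
  | nil => rfl
  | cons w ws ih =>
    simp only [pvA_loop, List.map_cons, pvGoA, pvA_ok_eq, pvA_num_eq]
    split_ifs <;> simp [ih]

-- ===== VERDICT (by name: the statement is the Claim_ definition above) =====
theorem check_task_string_spec : Claim_equal_check_task_string := by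
  intro t_s _
  show check_task_string t_s = check_task_string_alt t_s
  rw [check_task_string, check_task_string_alt, pvA_loop_eq, PySem.Str.split₀_map_toList]
  exact pvMain t_s.toList [] 0 [] 0 rfl
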